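-- pv_equiv track=rewrite | github.com/alvin-alvo/safenet-soho-security-framework | scripts/allow_peers.py | is_allow_listed
-- ===== SOURCE A (Python) =====
-- def is_allow_listed(groups1, groups2, policy_rules):
--     """Check if any of the device 1 groups are allowed to talk to device 2 groups based on the policy."""
--     for rule in policy_rules:
--         if rule.get('action') == 'allow':
--             if rule.get('from') in groups1 and rule.get('to') in groups2:
--                 return True
--             # Check reverse direction as well for P2P routing
--             if rule.get('from') in groups2 and rule.get('to') in groups1:
--                 return True
--     return False
-- ===== SOURCE B (Python) =====
-- def is_allow_listed(groups1, groups2, policy_rules):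
--     """Check if any of the device 1 groups are allowed to talk to device 2 groups based on the policy."""
--     allowed = {(r.get('from'), r.get('to')) for r in policy_rules if r.get('action') == 'allow'}
--     return any((a, b) in allowed or (b, a) in allowed
--                for a in groups1 for b in groups2)
-- ===== Notes on version B (the rewrite author's own statement) =====
-- stated objective: alternative
-- what changed: B builds an index (a set of allowed (from,to) edges) in one pass over the rules and then iterates over the product of the two group lists, testing each group pair against the index in both orientations, instead of scanning rules and testing rule endpoints for membership in the group lists.
import Mathlib
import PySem

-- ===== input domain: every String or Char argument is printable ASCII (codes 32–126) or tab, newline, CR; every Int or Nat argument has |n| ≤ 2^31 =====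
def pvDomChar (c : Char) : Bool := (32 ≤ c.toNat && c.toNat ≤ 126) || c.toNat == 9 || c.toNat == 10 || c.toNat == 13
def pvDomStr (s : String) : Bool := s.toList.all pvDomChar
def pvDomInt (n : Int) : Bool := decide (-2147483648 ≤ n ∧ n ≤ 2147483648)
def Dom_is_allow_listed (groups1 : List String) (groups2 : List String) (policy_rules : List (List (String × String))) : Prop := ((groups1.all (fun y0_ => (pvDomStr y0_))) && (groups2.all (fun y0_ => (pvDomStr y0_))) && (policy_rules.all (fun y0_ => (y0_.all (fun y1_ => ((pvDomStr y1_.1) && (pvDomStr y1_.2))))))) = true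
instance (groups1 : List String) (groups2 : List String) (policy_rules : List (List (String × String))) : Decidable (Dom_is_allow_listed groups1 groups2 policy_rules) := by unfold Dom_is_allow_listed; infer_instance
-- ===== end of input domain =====

-- B indexes the allowed (from,to) edges once and then iterates the product of the two group
-- lists, looking each pair up in both orientations (objective: alternative).

-- ===== PORT A =====
-- Python `rule.get(k) in groups`: the Optional value is in the String list iff it is `some s` with s in the list.
def pvOptMem (x : Option String) (g : List String) : Bool :=
  match x with
  | some s => g.contains s
  | none => false

-- the `for rule in policy_rules` loop with its early returns
def pvALoop (groups1 groups2 : List String) : List (List (String × String)) → Bool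
  | [] => false
  | r :: rest =>
    if PySem.Dict.get? (PySem.Dict.mk r) "action" == some "allow" then
      if pvOptMem (PySem.Dict.get? (PySem.Dict.mk r) "from") groups1
          && pvOptMem (PySem.Dict.get? (PySem.Dict.mk r) "to") groups2 then
        true
      else if pvOptMem (PySem.Dict.get? (PySem.Dict.mk r) "from") groups2
          && pvOptMem (PySem.Dict.get? (PySem.Dict.mk r) "to") groups1 then
        true
      else pvALoop groups1 groups2 rest
    else pvALoop groups1 groups2 rest

def is_allow_listed (groups1 : List String) (groups2 : List String) (policy_rules : List (List (String × String))) : Bool :=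
  pvALoop groups1 groups2 policy_rules

-- ===== PORT B =====
-- the set comprehension {(r.get('from'), r.get('to')) for r in policy_rules if r.get('action') == 'allow'}
def pvAllowedEdges (policy_rules : List (List (String × String))) : PySem.Set (Option String × Option String) :=
  PySem.Set.ofList
    ((policy_rules.filter
        (fun r => PySem.Dict.get? (PySem.Dict.mk r) "action" == some "allow")).map
      (fun r => (PySem.Dict.get? (PySem.Dict.mk r) "from", PySem.Dict.get? (PySem.Dict.mk r) "to")))

def is_allow_listed_alt (groups1 : List String) (groups2 : List String) (policy_rules : List (List (String × String))) : Bool :=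
  let allowed := pvAllowedEdges policy_rules
  groups1.any (fun a => groups2.any (fun b =>
    PySem.Set.contains allowed (some a, some b) || PySem.Set.contains allowed (some b, some a)))

-- ===== PRECONDITION & SPEC =====
def Spec_is_allow_listed (groups1 : List String) (groups2 : List String) (policy_rules : List (List (String × String))) (out : Bool) : Prop := out = is_allow_listed_alt groups1 groups2 policy_rules
instance (groups1 : List String) (groups2 : List String) (policy_rules : List (List (String × String))) (out : Bool) : Decidable (Spec_is_allow_listed groups1 groups2 policy_rules out) := by unfold Spec_is_allow_listed; infer_instance

-- ===== CLAIM (what is proved, stated in full; the proofs are below) =====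
def Claim_equal_is_allow_listed : Prop := ∀ (groups1 : List String) (groups2 : List String) (policy_rules : List (List (String × String))), Dom_is_allow_listed groups1 groups2 policy_rules → Spec_is_allow_listed groups1 groups2 policy_rules (is_allow_listed groups1 groups2 policy_rules)

-- ===== LEMMAS AND PROOFS =====

-- the rule-level condition A tests, as a Prop
def pvHit (groups1 groups2 : List String) (r : List (String × String)) : Prop :=
  PySem.Dict.get? (PySem.Dict.mk r) "action" = some "allow" ∧
    ((pvOptMem (PySem.Dict.get? (PySem.Dict.mk r) "from") groups1 = true ∧
        pvOptMem (PySem.Dict.get? (PySem.Dict.mk r) "to") groups2 = true) ∨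
     (pvOptMem (PySem.Dict.get? (PySem.Dict.mk r) "from") groups2 = true ∧
        pvOptMem (PySem.Dict.get? (PySem.Dict.mk r) "to") groups1 = true))

lemma pvALoop_iff (groups1 groups2 : List String) (rules : List (List (String × String))) :
    pvALoop groups1 groups2 rules = true ↔ ∃ r ∈ rules, pvHit groups1 groups2 r := by
  induction rules with
  | nil => simp [pvALoop]
  | cons r rest ih =>
    simp only [pvALoop]
    split_ifs with h1 h2 h3 <;> simp_all [pvHit]

lemma pvOptMem_iff (x : Option String) (g : List String) :
    pvOptMem x g = true ↔ ∃ s ∈ g, x = some s := by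
  cases x <;> simp [pvOptMem, eq_comm]

lemma pvEdge_mem_iff (rules : List (List (String × String))) (a b : String) :
    (some a, some b) ∈ pvAllowedEdges rules ↔
      ∃ r ∈ rules, PySem.Dict.get? (PySem.Dict.mk r) "action" = some "allow" ∧
        PySem.Dict.get? (PySem.Dict.mk r) "from" = some a ∧
        PySem.Dict.get? (PySem.Dict.mk r) "to" = some b := by
  simp only [pvAllowedEdges, PySem.Set.mem_ofList, List.mem_map, List.mem_filter,
    Prod.mk.injEq, beq_iff_eq]
  constructor
  · rintro ⟨r, ⟨hr, hal⟩, hf, ht⟩; exact ⟨r, hr, hal, hf, ht⟩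
  · rintro ⟨r, hr, hal, hf, ht⟩; exact ⟨r, ⟨hr, hal⟩, hf, ht⟩

lemma pvAlt_iff (groups1 groups2 : List String) (rules : List (List (String × String))) :
    is_allow_listed_alt groups1 groups2 rules = true ↔ ∃ r ∈ rules, pvHit groups1 groups2 r := by
  simp only [is_allow_listed_alt, List.any_eq_true, Bool.or_eq_true, PySem.Set.contains_iff]
  constructor
  · rintro ⟨a, ha, b, hb, (h | h)⟩
    · obtain ⟨r, hr, hal, hfa, htb⟩ := (pvEdge_mem_iff rules a b).1 h
      refine ⟨r, hr, hal, Or.inl ?_⟩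
      rw [hfa, htb]
      simp [pvOptMem, ha, hb]
    · obtain ⟨r, hr, hal, hfb, hta⟩ := (pvEdge_mem_iff rules b a).1 h
      refine ⟨r, hr, hal, Or.inr ?_⟩
      rw [hfb, hta]
      simp [pvOptMem, ha, hb]
  · rintro ⟨r, hr, hal, (⟨hf, ht⟩ | ⟨hf, ht⟩)⟩
    · obtain ⟨a, ha, hfa⟩ := (pvOptMem_iff _ _).1 hf
      obtain ⟨b, hb, htb⟩ := (pvOptMem_iff _ _).1 ht
      exact ⟨a, ha, b, hb, Or.inl ((pvEdge_mem_iff rules a b).2 ⟨r, hr, hal, hfa, htb⟩)⟩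
    · obtain ⟨b, hb, hfb⟩ := (pvOptMem_iff _ _).1 hf
      obtain ⟨a, ha, hta⟩ := (pvOptMem_iff _ _).1 ht
      exact ⟨a, ha, b, hb, Or.inr ((pvEdge_mem_iff rules b a).2 ⟨r, hr, hal, hfb, hta⟩)⟩

-- ===== VERDICT (by name: the statement is the Claim_ definition above) =====
theorem is_allow_listed_spec : Claim_equal_is_allow_listed := by
  intro g1 g2 rules _
  unfold Spec_is_allow_listed is_allow_listed
  rw [Bool.eq_iff_iff, pvALoop_iff, pvAlt_iff]
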